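-- pv_equiv track=rewrite | github.com/lirmag/All-works | ege_dec_2var/22.py | f
-- ===== SOURCE A (Python) =====
-- def f(x):
--     S = x
--     R = 0
--     while x > 0:
--         d = x % 2
--         R = 10 * R + d
--         x = x // 2
--     S = R + S
--     return str(S)
-- ===== SOURCE B (Python) =====
-- def f(x):
--     # MSB-to-LSB bit scan with a growing decimal place value, instead of
--     # A's LSB-first Horner accumulation via divmod.
--     if x <= 0:
--         return str(x)
--     R, p = 0, 1
--     for i in range(x.bit_length() - 1, -1, -1):
--         R += ((x >> i) & 1) * p
--         p *= 10
--     return str(x + R)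
-- ===== Notes on version B (the rewrite author's own statement) =====
-- stated objective: alternative
-- what changed: Replaces A's LSB-first Horner loop (repeated divmod by 2, R = 10*R + d) with an MSB-to-LSB scan of the bits via bit_length() and shifts, accumulating each bit times a growing power-of-ten place value.
import Mathlib
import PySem

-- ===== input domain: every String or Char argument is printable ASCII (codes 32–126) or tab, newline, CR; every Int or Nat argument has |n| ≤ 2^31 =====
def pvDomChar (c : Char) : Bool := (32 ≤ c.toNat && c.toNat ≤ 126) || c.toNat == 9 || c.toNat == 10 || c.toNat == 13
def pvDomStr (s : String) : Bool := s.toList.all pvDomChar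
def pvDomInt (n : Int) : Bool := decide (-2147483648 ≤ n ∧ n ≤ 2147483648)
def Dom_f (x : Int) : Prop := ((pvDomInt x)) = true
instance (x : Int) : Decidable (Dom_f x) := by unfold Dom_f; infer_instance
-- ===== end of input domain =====

-- B replaces A's LSB-first Horner loop (divmod by 2) with an MSB-to-LSB bit scan via
-- bit_length() and shifts, accumulating each bit times a growing power-of-ten place value
-- (objective: alternative; same asymptotic cost).

-- ===== PORT A =====
-- A's while loop: state is (x, R); returns the final R
def fLoop (x R : Int) : Int :=
  if 0 < x then fLoop (PySem.Int.floordiv x 2) (10 * R + PySem.Int.mod x 2) else R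
termination_by x.toNat
decreasing_by
  rw [PySem.Int.floordiv_eq_ediv_of_pos (by omega : (0:Int) < 2)]
  omega

def f (x : Int) : String := PySem.Int.toStr (fLoop x 0 + x)

-- ===== PORT B =====
-- if x <= 0: return str(x); else fold of
-- 'for i in range(x.bit_length() - 1, -1, -1): R += ((x >> i) & 1) * p; p *= 10'
def f_alt (x : Int) : String :=
  if x ≤ 0 then PySem.Int.toStr x
  else
    let st := (PySem.List.pyRange ((PySem.Int.bitLength x : Int) - 1) (-1) (-1)).foldl
      (fun (st : Int × Int) i => (st.1 + PySem.Int.band (x >>> i.toNat) 1 * st.2, st.2 * 10))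
      (0, 1)
    PySem.Int.toStr (x + st.1)

-- ===== PRECONDITION & SPEC =====
def Spec_f (x : Int) (out : String) : Prop := out = f_alt x
instance (x : Int) (out : String) : Decidable (Spec_f x out) := by unfold Spec_f; infer_instance

-- ===== CLAIM (what is proved, stated in full; the proofs are below) =====
def Claim_equal_f : Prop := ∀ (x : Int), Dom_f x → Spec_f x (f x)

-- ===== LEMMAS AND PROOFS =====

-- the decimal value of the reversed low t bits of x (bit 0 of x most significant)
def pvRevT (x : Int) : Nat → Int
  | 0 => 0
  | t+1 => PySem.Int.band x 1 * 10 ^ t + pvRevT (x / 2) t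

-- peel the TOP bit of pvRevT
theorem pvRevT_succ_top (x : Int) (t : Nat) :
    pvRevT x (t+1) = PySem.Int.band (x / 2 ^ t) 1 + 10 * pvRevT x t := by
  induction t generalizing x with
  | zero => simp [pvRevT]
  | succ t ih =>
    have h1 : pvRevT x (t+2)
        = PySem.Int.band x 1 * 10 ^ (t+1) + pvRevT (x / 2) (t+1) := rfl
    have h2 : pvRevT x (t+1)
        = PySem.Int.band x 1 * 10 ^ t + pvRevT (x / 2) t := rfl
    have hdd : x / 2 / 2 ^ t = x / 2 ^ (t+1) := by
      rw [Int.ediv_ediv_of_nonneg (by omega), pow_succ, mul_comm ((2:Int)^t) 2]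
    rw [h1, ih, h2, hdd]
    ring

-- B's fold over range(t-1, -1, -1), from an arbitrary start state
theorem pv_fold_eq (x : Int) (t : Nat) : ∀ R p : Int,
    (PySem.List.pyRange ((t : Int) - 1) (-1) (-1)).foldl
      (fun (st : Int × Int) i => (st.1 + PySem.Int.band (x >>> i.toNat) 1 * st.2, st.2 * 10))
      (R, p)
    = (R + p * pvRevT x t, p * 10 ^ t) := by
  induction t with
  | zero =>
    intro R p
    rw [PySem.List.pyRange_neg_one_eq_nil (by omega)]
    simp [pvRevT]
  | succ t ih =>
    intro R p
    have hcast : ((t+1 : Nat) : Int) - 1 = (t : Int) := by push_cast; ring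
    have hsh : x >>> (((t : Int).toNat : Int)) = x / 2 ^ t := by
      rw [Int.toNat_natCast, Int.shiftRight_natCast_right, Int.shiftRight_eq_div_pow]
      push_cast
      ring
    rw [hcast, PySem.List.pyRange_neg_one_cons (by omega : (-1:Int) < (t:Int)),
      List.foldl_cons]
    simp only [hsh]
    rw [ih, pvRevT_succ_top]
    refine Prod.ext ?_ ?_ <;> simp only [] <;> ring

-- A's loop computes pvRevT at the bit length (strong induction via a Nat bound)
theorem pv_fLoop_eq (n : Nat) : ∀ x : Int, 0 ≤ x → x.toNat ≤ n → ∀ R,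
    fLoop x R = R * 10 ^ PySem.Int.bitLength x + pvRevT x (PySem.Int.bitLength x) := by
  induction n with
  | zero =>
    intro x hx hle R
    have hx0 : x = 0 := by omega
    subst hx0
    rw [fLoop]
    simp [pvRevT, PySem.Int.bitLength_zero]
  | succ n ih =>
    intro x hx hle R
    rw [fLoop]
    by_cases h : 0 < x
    · simp only [if_pos h]
      have hfd : PySem.Int.floordiv x 2 = x / 2 :=
        PySem.Int.floordiv_eq_ediv_of_pos (by omega)
      have hmd : PySem.Int.mod x 2 = x % 2 :=
        PySem.Int.mod_eq_emod_of_pos (by omega)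
      have hbl : PySem.Int.bitLength x = PySem.Int.bitLength (x / 2) + 1 := by
        rw [PySem.Int.bitLength_of_pos h, hfd]
      have hrec := ih (x / 2) (by omega) (by omega) (10 * R + PySem.Int.mod x 2)
      rw [hfd, hrec, hbl]
      have hrev : pvRevT x (PySem.Int.bitLength (x / 2) + 1)
          = PySem.Int.band x 1 * 10 ^ PySem.Int.bitLength (x / 2)
            + pvRevT (x / 2) (PySem.Int.bitLength (x / 2)) := rfl
      rw [hrev, PySem.Int.band_one, hmd]
      ring
    · simp only [if_neg h]
      have hx0 : x = 0 := by omega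
      subst hx0
      simp [pvRevT, PySem.Int.bitLength_zero]

-- ===== VERDICT (by name: the statement is the Claim_ definition above) =====
theorem f_spec : Claim_equal_f := by
  intro x _
  unfold Spec_f f f_alt
  by_cases h : x ≤ 0
  · rw [if_pos h, fLoop, if_neg (by omega)]
    simp
  · rw [if_neg h]
    have hB1 : ((PySem.List.pyRange ((PySem.Int.bitLength x : Int) - 1) (-1) (-1)).foldl
        (fun (st : Int × Int) i => (st.1 + PySem.Int.band (x >>> i.toNat) 1 * st.2, st.2 * 10))
        (0, 1)).1 = pvRevT x (PySem.Int.bitLength x) := by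
      rw [pv_fold_eq]
      simp
    have hA := pv_fLoop_eq x.toNat x (by omega) (le_refl _) 0
    simp only [hB1, hA]
    congr 1
    ring
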